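-- pv_equiv track=rewrite | github.com/Mont9165/InvestigatingTheImpactOfTestSpecificRefactoring | 5_analyze_test_refactoring/src/analysis/rq3/0_collect_testsmell/collect_testsmell.py | group_commits_by_repo
-- ===== SOURCE A (Python) =====
-- def group_commits_by_repo(commit_urls):
--     """コミットURLをリポジトリ単位でグループ化"""
--     repo_groups = {}
--     for url in commit_urls:
--         commit_dir = url.replace("https://github.com/", "").replace("commit/", "")
--         repo_name = "/".join(commit_dir.split("/")[:-1])
--         if repo_name not in repo_groups:
--             repo_groups[repo_name] = []
--         repo_groups[repo_name].append(url)
--     return repo_groups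
-- ===== SOURCE B (Python) =====
-- def group_commits_by_repo(commit_urls):
--     def repo_name_of(url):
--         commit_dir = url.replace("https://github.com/", "").replace("commit/", "")
--         return "/".join(commit_dir.split("/")[:-1])
--     names = [repo_name_of(u) for u in commit_urls]
--     return {k: [u for u, n in zip(commit_urls, names) if n == k]
--             for k in dict.fromkeys(names)}
-- ===== Notes on version B (the rewrite author's own statement) =====
-- stated objective: alternative
-- what changed: B replaces A's single-pass dict accumulation with a two-phase pipeline: precompute each URL's repo name, take the ordered-deduplicated key list (dict.fromkeys), and build each group by filtering the zipped (url, name) list per key.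
import Mathlib
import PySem

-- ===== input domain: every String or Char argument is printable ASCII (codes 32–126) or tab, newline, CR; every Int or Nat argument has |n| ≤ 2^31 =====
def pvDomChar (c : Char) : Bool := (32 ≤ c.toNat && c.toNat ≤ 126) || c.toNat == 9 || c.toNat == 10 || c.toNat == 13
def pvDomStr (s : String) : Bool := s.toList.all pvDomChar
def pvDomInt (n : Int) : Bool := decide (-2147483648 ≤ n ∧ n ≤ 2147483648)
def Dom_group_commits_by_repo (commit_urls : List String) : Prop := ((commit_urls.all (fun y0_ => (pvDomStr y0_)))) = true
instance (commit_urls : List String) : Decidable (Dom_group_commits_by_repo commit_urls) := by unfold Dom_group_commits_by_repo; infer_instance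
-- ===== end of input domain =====

-- B groups by precomputing repo names, deduplicating them in first-occurrence order (dict.fromkeys)
-- and filtering the zipped (url, name) list per key, instead of A's single-pass dict accumulation
-- (objective: alternative decomposition; same results, not claimed faster).

-- ===== PORT A =====
-- shared parsing helper: url.replace(...).replace(...), then "/".join(split("/")[:-1]);
-- split? is `some` here since the separator "/" is non-empty, so `.getD []` never takes its default
def repoNameOf (url : String) : String :=
  let commitDir := PySem.Str.replace (PySem.Str.replace url "https://github.com/" "") "commit/" ""
  PySem.Str.join "/" (PySem.List.slice ((PySem.Str.split? commitDir "/").getD []) none (some (-1)))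

def group_commits_by_repo (commit_urls : List String) : List (String × List String) :=
  (commit_urls.foldl (fun d url =>
      let repoName := repoNameOf url
      let d' := if d.contains repoName then d else d.insert repoName ([] : List String)
      d'.modify repoName [] (fun l => l ++ [url]))
    PySem.Dict.empty).items

-- ===== PORT B =====
def group_commits_by_repo_alt (commit_urls : List String) : List (String × List String) :=
  let names := commit_urls.map repoNameOf
  (PySem.List.dedup names).map (fun k =>
    (k, ((commit_urls.zip names).filter (fun p => p.2 == k)).map (fun p => p.1)))

-- ===== PRECONDITION & SPEC =====
def Spec_group_commits_by_repo (commit_urls : List String) (out : List (String × List String)) : Prop := out = group_commits_by_repo_alt commit_urls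
instance (commit_urls : List String) (out : List (String × List String)) : Decidable (Spec_group_commits_by_repo commit_urls out) := by unfold Spec_group_commits_by_repo; infer_instance

-- ===== CLAIM (what is proved, stated in full; the proofs are below) =====
def Claim_equal_group_commits_by_repo : Prop := ∀ (commit_urls : List String), Dom_group_commits_by_repo commit_urls → Spec_group_commits_by_repo commit_urls (group_commits_by_repo commit_urls)

-- ===== LEMMAS AND PROOFS =====

-- A's "if k not in d: d[k] = []" followed by append is exactly a modify with default []
theorem stepA_eq_modify (d : PySem.Dict String (List String)) (url : String) :
    (let repoName := repoNameOf url
     let d' := if d.contains repoName then d else d.insert repoName ([] : List String)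
     d'.modify repoName [] (fun l => l ++ [url]))
    = d.modify (repoNameOf url) [] (fun l => l ++ [url]) := by
  set k := repoNameOf url
  by_cases h : d.contains k
  · simp [h]
  · simp only [Bool.not_eq_true] at h
    simp [h, PySem.Dict.modify, PySem.Dict.getD_insert_self,
      PySem.Dict.insert_insert_self, PySem.Dict.getD_of_not_contains d ([] : List String) h]

-- pairing each url with its repo name, then filtering on the name and projecting the url
theorem filter_pairs_eq (us : List String) (k : String) :
    ((us.map (fun u => (repoNameOf u, u))).filter (fun p => p.1 == k)).map (fun p => p.2)
    = ((us.zip (us.map repoNameOf)).filter (fun p => p.2 == k)).map (fun p => p.1) := by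
  induction us with
  | nil => rfl
  | cons u us ih =>
    by_cases h : repoNameOf u == k <;> simp [h, ih]

theorem group_commits_eq (commit_urls : List String) :
    group_commits_by_repo commit_urls = group_commits_by_repo_alt commit_urls := by
  unfold group_commits_by_repo group_commits_by_repo_alt
  have hstep : (commit_urls.foldl (fun d url =>
      let repoName := repoNameOf url
      let d' := if d.contains repoName then d else d.insert repoName ([] : List String)
      d'.modify repoName [] (fun l => l ++ [url])) PySem.Dict.empty)
      = (commit_urls.map (fun u => (repoNameOf u, u))).foldl
          (fun d p => d.modify p.1 [] (fun l => l ++ [p.2])) PySem.Dict.empty := by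
    rw [List.foldl_map]
    exact PySem.List.foldl_congr_mem _ _ _ _ (fun d u _ => stepA_eq_modify d u)
  rw [hstep]
  set l := commit_urls.map (fun u => (repoNameOf u, u)) with hl
  set D := l.foldl (fun d p => d.modify p.1 [] (fun xs => xs ++ [p.2])) PySem.Dict.empty with hD
  have hkeys : D.keys = PySem.Set.ofList (commit_urls.map repoNameOf) := by
    have := PySem.Dict.keys_foldl_modify_key l Prod.fst ([] : List String)
      (fun _ p => (fun xs => xs ++ [p.2])) PySem.Dict.empty
    simp only [hD, this, PySem.Dict.keys_empty]
    rw [hl, List.map_map]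
    rfl
  have hnd : D.keys.Nodup := by
    apply PySem.Dict.nodup_keys_foldl_modify_key l Prod.fst ([] : List String)
      (fun _ p => (fun xs => xs ++ [p.2])) PySem.Dict.empty
    simp [PySem.Dict.keys_empty]
  rw [PySem.Dict.items_eq_map_keys D hnd ([] : List String), hkeys]
  simp only [PySem.List.dedup_eq_ofList]
  refine List.map_congr_left (fun k _ => ?_)
  have hg : D.getD k [] = (l.filter (fun p => p.1 == k)).map (fun p => p.2) := by
    rw [hD, PySem.Dict.getD_foldl_modify_append]
    simp [PySem.Dict.getD_empty]
  rw [hg, hl, filter_pairs_eq]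

-- ===== VERDICT (by name: the statement is the Claim_ definition above) =====
theorem group_commits_by_repo_spec : Claim_equal_group_commits_by_repo := by
  intro commit_urls _
  unfold Spec_group_commits_by_repo
  exact group_commits_eq commit_urls
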